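-- pv_equiv track=rewrite | github.com/zoro6908/PY_acamedy | ExPy10804.py | find
-- ===== SOURCE A (Python) =====
-- def find(source, ch, all = False):
--     position = [ ]
--     for i in range(len(source)):
--         if source[i] == ch:
--             position.append(i)
--             if not all:
--                 break
--     return position
-- ===== SOURCE B (Python) =====
-- def find(source, ch, all = False):
--     # B: delegate the scanning to str.find, jumping from match to match.
--     # An element of a string has length 1, so a ch of any other length never matches.
--     if len(ch) != 1:
--         return []
--     positions = []
--     i = source.find(ch)
--     while i != -1:
--         positions.append(i)
--         if not all:
--             break
--         i = source.find(ch, i + 1)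
--     return positions
-- ===== Notes on version B (the rewrite author's own statement) =====
-- stated objective: faster
-- what changed: Replaces A's Python-level index-by-index scan comparing source[i] == ch by a guard on len(ch) plus a while loop that jumps from match to match with the built-in str.find(ch, i+1), which does the per-character scanning in C.
import Mathlib
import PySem

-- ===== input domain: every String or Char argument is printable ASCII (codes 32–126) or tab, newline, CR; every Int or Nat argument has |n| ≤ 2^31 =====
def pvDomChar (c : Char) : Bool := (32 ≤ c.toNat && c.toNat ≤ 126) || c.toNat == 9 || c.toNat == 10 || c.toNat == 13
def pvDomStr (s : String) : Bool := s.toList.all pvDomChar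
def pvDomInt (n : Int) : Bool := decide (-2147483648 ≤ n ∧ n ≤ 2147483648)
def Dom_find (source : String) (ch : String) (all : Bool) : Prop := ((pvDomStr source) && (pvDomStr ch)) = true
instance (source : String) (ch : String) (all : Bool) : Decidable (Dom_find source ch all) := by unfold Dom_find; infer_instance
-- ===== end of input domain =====

-- B replaces A's index-by-index scan by repeated str.find jumps between matches (objective: alternative).

-- ===== PORT A =====
-- A: loop over every index, compare source[i] == ch, append, break early unless `all`.
def findLoop : List Char → List Char → Bool → Int → List Int
  | [], _, _, _ => []
  | c :: rest, chL, all, i =>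
    if [c] = chL then
      if all then i :: findLoop rest chL all (i + 1) else [i]
    else findLoop rest chL all (i + 1)

def find (source : String) (ch : String) (all : Bool) : List Int :=
  findLoop source.toList ch.toList all 0

-- ===== PORT B =====
-- B: guard len(ch) != 1, then a while loop over i = source.find(ch[, i+1]).
-- The while loop is ported with fuel |s|+1: each iteration strictly increases i, so fuel is never exhausted.
def findAltLoop (s : List Char) (ch : List Char) (all : Bool) : Nat → Int → List Int
  | 0, _ => []
  | fuel + 1, i =>
    if i = -1 then []
    else if all then i :: findAltLoop s ch all fuel (PySem.Chars.findFrom s ch (i + 1))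
    else [i]

def find_alt (source : String) (ch : String) (all : Bool) : List Int :=
  if ch.toList.length ≠ 1 then []
  else findAltLoop source.toList ch.toList all (source.toList.length + 1)
    (PySem.Chars.find source.toList ch.toList)

-- ===== PRECONDITION & SPEC =====
def Spec_find (source : String) (ch : String) (all : Bool) (out : List Int) : Prop := out = find_alt source ch all
instance (source : String) (ch : String) (all : Bool) (out : List Int) : Decidable (Spec_find source ch all out) := by unfold Spec_find; infer_instance

-- ===== CLAIM (what is proved, stated in full; the proofs are below) =====
def Claim_equal_find : Prop := ∀ (source : String) (ch : String) (all : Bool), Dom_find source ch all → Spec_find source ch all (find source ch all)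

-- ===== LEMMAS AND PROOFS =====

-- A returns [] when ch is not a single character: [c] = chL never holds.
theorem findLoop_not_single (chL : List Char) (h : chL.length ≠ 1) (all : Bool) :
    ∀ (l : List Char) (i : Int), findLoop l chL all i = [] := by
  intro l
  induction l with
  | nil => intro i; simp [findLoop]
  | cons a rest ih =>
    intro i
    have hne : ¬ ([a] = chL) := fun he => h (he ▸ rfl)
    simp [findLoop, hne, ih]

-- A returns [] when c does not occur in the remaining suffix.
theorem findLoop_not_mem (c : Char) (all : Bool) :
    ∀ (l : List Char), c ∉ l → ∀ (i : Int), findLoop l [c] all i = [] := by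
  intro l
  induction l with
  | nil => intro _ i; simp [findLoop]
  | cons a rest ih =>
    intro hmem i
    have ha : ¬ ([a] = [c]) := by
      simp only [List.cons.injEq, and_true]
      exact fun he => hmem (he ▸ List.mem_cons_self)
    simp [findLoop, ha, ih (fun hm => hmem (List.mem_cons_of_mem _ hm))]

-- [c] is a prefix of l iff l starts with c.
theorem single_prefix_iff (c : Char) (l : List Char) : [c] <+: l ↔ ∃ t, l = c :: t := by
  cases l with
  | nil => simp
  | cons a t =>
    constructor
    · intro h
      rcases List.cons_prefix_cons.mp h with ⟨rfl, -⟩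
      exact ⟨t, rfl⟩
    · rintro ⟨t', he⟩
      rw [he]
      exact List.cons_prefix_cons.mpr ⟨rfl, List.nil_prefix⟩

-- A's scan of the suffix starting at k, when the first occurrence is at m.
theorem findLoop_first (s : List Char) (c : Char) (all : Bool) (m : Nat) (hm : m < s.length)
    (hc : s[m] = c) :
    ∀ (d k : Nat), m - k = d → k ≤ m → (∀ i : Nat, k ≤ i → i < m → ¬ ([c] <+: s.drop i)) →
      findLoop (s.drop k) [c] all (k : Int) =
        if all then (m : Int) :: findLoop (s.drop (m + 1)) [c] all ((m : Int) + 1) else [(m : Int)] := by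
  intro d
  induction d with
  | zero =>
    intro k hd hk _
    have hkm : k = m := by omega
    subst hkm
    rw [List.drop_eq_getElem_cons hm, hc]
    cases all <;> simp [findLoop]
  | succ n ih =>
    intro k hd hk hno
    have hklt : k < m := by omega
    have hks : k < s.length := by omega
    rw [List.drop_eq_getElem_cons hks]
    have hne : ¬ ([s[k]] = [c]) := by
      simp only [List.cons.injEq, and_true]
      intro he
      exact hno k le_rfl hklt
        ((single_prefix_iff c _).mpr ⟨s.drop (k + 1), by rw [List.drop_eq_getElem_cons hks, he]⟩)
    have hcast : ((k : Int) + 1) = ((k + 1 : Nat) : Int) := by push_cast; ring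
    simp only [findLoop, hne, if_false, hcast]
    exact ih (k + 1) (by omega) (by omega) (fun i h1 h2 => hno i (by omega) h2)

-- Main invariant: B's while loop from state findFrom s [c] k equals A's scan of the suffix from k.
theorem loop_agree (s : List Char) (c : Char) (all : Bool) :
    ∀ (n : Nat) (k : Nat), k ≤ s.length → s.length - k ≤ n →
      findAltLoop s [c] all n (PySem.Chars.findFrom s [c] (k : Int)) =
        findLoop (s.drop k) [c] all (k : Int) := by
  intro n
  induction n with
  | zero =>
    intro k hk hn
    have : s.drop k = [] := List.drop_eq_nil_of_le (by omega)
    rw [this]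
    simp [findAltLoop, findLoop]
  | succ n ih =>
    intro k hk _
    by_cases hj : PySem.Chars.findFrom s [c] (k : Int) = -1
    · rw [hj]
      have hnot : ¬ ([c] <:+: s.drop k) := (PySem.Chars.findFrom_natCast_eq_neg_one_iff s [c] k hk).mp hj
      have hcmem : c ∉ s.drop k := fun hmem => hnot ((List.singleton_infix_iff c _).mpr hmem)
      rw [findLoop_not_mem c all _ hcmem]
      simp [findAltLoop]
    · obtain ⟨hkj, hpre, hleast⟩ := PySem.Chars.findFrom_natCast_spec s [c] k hk hj
      set j := PySem.Chars.findFrom s [c] (k : Int) with hjdef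
      clear_value j
      have hj0 : 0 ≤ j := le_trans (by exact_mod_cast Int.natCast_nonneg k) hkj
      have hjn : j = ((j.toNat : Nat) : Int) := (Int.toNat_of_nonneg hj0).symm
      rcases (single_prefix_iff c _).mp hpre with ⟨t, ht⟩
      have hjlen : j.toNat < s.length := by
        by_contra hge
        have : s.drop j.toNat = [] := List.drop_eq_nil_of_le (by omega)
        rw [this] at ht; simp at ht
      have hget : s[j.toNat] = c := by
        have := List.drop_eq_getElem_cons hjlen
        rw [this] at ht
        exact (List.cons.injEq _ _ _ _ ▸ ht).1
      have hkj2 : k ≤ j.toNat := by omega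
      have hA := findLoop_first s c all j.toNat hjlen hget (j.toNat - k) k rfl hkj2
        (fun i h1 h2 hp => hleast i h1 h2 hp)
      rw [hA]
      cases all with
      | false =>
        have hunf : findAltLoop s [c] false (n + 1) j =
            (if j = -1 then []
             else if false then j :: findAltLoop s [c] false n (PySem.Chars.findFrom s [c] (j + 1))
             else [j]) := rfl
        rw [hunf, if_neg hj]
        simp only [Bool.false_eq_true, if_false]
        rw [← hjn]
      | true =>
        have hstep : (j + 1) = (((j.toNat + 1 : Nat)) : Int) := by omega
        have hrec : findAltLoop s [c] true n (PySem.Chars.findFrom s [c] (j + 1)) =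
            findLoop (s.drop (j.toNat + 1)) [c] true ((j.toNat + 1 : Nat) : Int) := by
          rw [hstep]
          exact ih (j.toNat + 1) (by omega) (by omega)
        have hunf : findAltLoop s [c] true (n + 1) j =
            (if j = -1 then []
             else if true then j :: findAltLoop s [c] true n (PySem.Chars.findFrom s [c] (j + 1))
             else [j]) := rfl
        rw [hunf, if_neg hj]
        simp only [if_true]
        rw [hrec]
        have hc1 : ((j.toNat + 1 : Nat) : Int) = j + 1 := by omega
        rw [hc1]
        rw [← hjn]

-- ===== VERDICT (by name: the statement is the Claim_ definition above) =====
theorem find_spec : Claim_equal_find := by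
  intro source ch all _
  unfold Spec_find find find_alt
  by_cases hlen : ch.toList.length ≠ 1
  · rw [if_pos hlen]
    exact findLoop_not_single ch.toList hlen all source.toList 0
  · push_neg at hlen
    rcases List.length_eq_one_iff.mp hlen with ⟨c, hc⟩
    simp only [hc, List.length_singleton, ne_eq, not_true_eq_false, if_false]
    have h0 : PySem.Chars.find source.toList [c] = PySem.Chars.findFrom source.toList [c] ((0 : Nat) : Int) := by
      simp [PySem.Chars.findFrom_zero]
    rw [h0]
    have := loop_agree source.toList c all (source.toList.length + 1) 0 (by omega) (by omega)
    simpa using this.symm
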